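-- pv_equiv track=rewrite | github.com/sanket-qp/IK | 16-Strings/smallest_substring_containing_all_characters_from_set.py | controls_the_set
-- ===== SOURCE A (Python) =====
-- def controls_the_set(S, start, end, _set):
--     """
--     checks if the given substring from start:end+1 contains all the characters from the set
--     """
--     temp_set = _set.copy()
--     for char in S[start:end + 1]:
--         if char in temp_set:
--             temp_set.remove(char)
--
--         if len(temp_set) == 0:
--             return True
--
--     return False
-- ===== SOURCE B (Python) =====
-- def controls_the_set(S, start, end, _set):
--     """
--     checks if the given substring from start:end+1 contains all the characters from the set
--     """
--     sub = list(S[start:end + 1])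
--     if not sub:
--         return False
--     required = list(_set)
--     return all(sub.count(c) >= required.count(c) for c in set(required))
-- ===== Notes on version B (the rewrite author's own statement) =====
-- stated objective: idiomatic
-- what changed: B replaces A's incremental remove-from-a-copy scan with early exit by a direct occurrence-count comparison: it materialises the window once and checks, for each distinct required element, that the window holds at least as many copies as _set does (duplicates in _set kept as a multiset, exactly as A's repeated remove treats them).
import Mathlib
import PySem

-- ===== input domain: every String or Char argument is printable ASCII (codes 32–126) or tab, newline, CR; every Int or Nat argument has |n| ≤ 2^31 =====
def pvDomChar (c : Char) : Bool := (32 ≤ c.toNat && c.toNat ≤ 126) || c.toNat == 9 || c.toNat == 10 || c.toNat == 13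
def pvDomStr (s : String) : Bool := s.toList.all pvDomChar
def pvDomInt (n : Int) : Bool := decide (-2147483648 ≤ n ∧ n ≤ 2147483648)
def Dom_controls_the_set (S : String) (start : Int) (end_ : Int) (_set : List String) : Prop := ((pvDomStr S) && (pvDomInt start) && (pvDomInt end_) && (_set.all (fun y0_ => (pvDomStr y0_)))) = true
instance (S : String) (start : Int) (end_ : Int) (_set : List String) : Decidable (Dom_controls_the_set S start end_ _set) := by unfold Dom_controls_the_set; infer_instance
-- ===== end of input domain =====

-- B replaces A's incremental remove-from-a-copy scan (with early exit) by a direct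
-- multiset occurrence-count comparison over the window; same results, similar cost (objective: idiomatic).


-- ===== PORT A =====
-- one step of A's loop body: 'if char in temp_set: temp_set.remove(char)'
def ctsStep (temp : List String) (c : Char) : List String :=
  if temp.contains (String.ofList [c]) then (PySem.List.remove? temp (String.ofList [c])).getD temp else temp

-- A's 'for char in S[start:end+1]' loop with its two early-return checks
def ctsLoop : List Char → List String → Bool
  | [], _ => false
  | c :: cs, temp =>
    let temp' := ctsStep temp c
    if temp'.length = 0 then true else ctsLoop cs temp'

def controls_the_set (S : String) (start : Int) (end_ : Int) (_set : List String) : Bool :=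
  ctsLoop (PySem.List.slice S.toList (some start) (some (end_ + 1))) _set

-- ===== PORT B =====
def controls_the_set_alt (S : String) (start : Int) (end_ : Int) (_set : List String) : Bool :=
  let sub : List String := (PySem.List.slice S.toList (some start) (some (end_ + 1))).map (fun c => String.ofList [c])
  if sub.isEmpty then false
  else (PySem.Set.ofList _set).all (fun c => decide (_set.count c ≤ sub.count c))

-- ===== PRECONDITION & SPEC =====
def Spec_controls_the_set (S : String) (start : Int) (end_ : Int) (_set : List String) (out : Bool) : Prop := out = controls_the_set_alt S start end_ _set
instance (S : String) (start : Int) (end_ : Int) (_set : List String) (out : Bool) : Decidable (Spec_controls_the_set S start end_ _set out) := by unfold Spec_controls_the_set; infer_instance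

-- ===== CLAIM (what is proved, stated in full; the proofs are below) =====
def Claim_equal_controls_the_set : Prop := ∀ (S : String) (start : Int) (end_ : Int) (_set : List String), Dom_controls_the_set S start end_ _set → Spec_controls_the_set S start end_ _set (controls_the_set S start end_ _set)

-- ===== LEMMAS AND PROOFS =====

-- stepping an empty temp_set leaves it empty
theorem ctsStep_nil (c : Char) : ctsStep [] c = [] := rfl

theorem foldl_ctsStep_nil (cs : List Char) : cs.foldl ctsStep [] = [] := by
  induction cs with
  | nil => rfl
  | cons c cs ih => simpa [ctsStep_nil] using ih

-- A's early-exiting loop equals: the scan is nonempty and folding the removals empties temp_set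
theorem ctsLoop_eq_foldl (cs : List Char) (temp : List String) :
    ctsLoop cs temp = (!cs.isEmpty && (cs.foldl ctsStep temp).isEmpty) := by
  induction cs generalizing temp with
  | nil => rfl
  | cons c cs ih =>
    by_cases h : (ctsStep temp c).length = 0
    · have hnil : ctsStep temp c = [] := List.length_eq_zero_iff.mp h
      simp [ctsLoop, List.foldl_cons, hnil, foldl_ctsStep_nil]
    · have hne : ¬ (ctsStep temp c).isEmpty := by
        cases he : ctsStep temp c with
        | nil => exact absurd (by simp [he]) h
        | cons a l => simp
      rw [ctsLoop]
      simp only [h, if_false, ih]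
      cases cs with
      | nil => simpa using hne
      | cons d ds => simp [List.foldl_cons]

-- count after one step: one matching copy of the char's string is removed (truncated at 0)
theorem count_ctsStep (temp : List String) (c : Char) (v : String) :
    (ctsStep temp c).count v = temp.count v - (if v = String.ofList [c] then 1 else 0) := by
  unfold ctsStep
  by_cases h : temp.contains (String.ofList [c])
  · have hmem : String.ofList [c] ∈ temp := by simpa using h
    rw [if_pos h, PySem.List.remove?_eq_some_erase _ _ hmem, Option.getD_some, List.count_erase]
    rcases eq_or_ne v (String.ofList [c]) with hv | hv
    · simp [hv]
    · simp [hv, Ne.symm hv]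
  · rw [if_neg h]
    by_cases hv : v = String.ofList [c]
    · have h0 : temp.count (String.ofList [c]) = 0 := List.count_eq_zero.mpr (by simpa using h)
      simp [hv, h0]
    · simp [hv]

-- count after the whole fold: multiset difference with the scanned characters
theorem count_foldl_ctsStep (cs : List Char) (temp : List String) (v : String) :
    (cs.foldl ctsStep temp).count v
      = temp.count v - (cs.map (fun c => String.ofList [c])).count v := by
  induction cs generalizing temp with
  | nil => simp
  | cons c cs ih =>
    rw [List.foldl_cons, ih, count_ctsStep]
    simp only [List.map_cons, List.count_cons]
    rcases eq_or_ne v (String.ofList [c]) with h | h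
    · simp [h, Nat.sub_sub, Nat.add_comm]
    · simp [h, Ne.symm h]

-- the fold empties temp_set iff the window covers temp_set's multiplicities
theorem foldl_ctsStep_isEmpty (cs : List Char) (temp : List String) :
    (cs.foldl ctsStep temp).isEmpty
      = temp.all (fun v => decide (temp.count v ≤ (cs.map (fun c => String.ofList [c])).count v)) := by
  rw [Bool.eq_iff_iff, List.isEmpty_iff, List.all_eq_true]
  constructor
  · intro h v _
    have hc := count_foldl_ctsStep cs temp v
    rw [h] at hc
    simp only [List.count_nil] at hc
    simp only [decide_eq_true_eq]
    omega
  · intro h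
    rw [List.eq_nil_iff_forall_not_mem]
    intro v hv
    have hc : 0 < (cs.foldl ctsStep temp).count v := List.count_pos_iff.mpr hv
    rw [count_foldl_ctsStep] at hc
    have hvtemp : v ∈ temp := by
      by_contra hvt
      rw [List.count_eq_zero.mpr hvt] at hc
      omega
    have := h v hvtemp
    simp only [decide_eq_true_eq] at this
    omega

-- quantifying over temp_set's elements = quantifying over its distinct elements (set(temp_set))
theorem all_ofList_counts (temp : List String) (sub : List String) :
    temp.all (fun v => decide (temp.count v ≤ sub.count v))
      = (PySem.Set.ofList temp).all (fun v => decide (temp.count v ≤ sub.count v)) := by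
  rw [Bool.eq_iff_iff, List.all_eq_true, List.all_eq_true]
  constructor <;> intro h v hv <;> exact h v (by simpa [PySem.Set.mem_ofList] using hv)

-- ===== VERDICT (by name: the statement is the Claim_ definition above) =====
theorem controls_the_set_spec : Claim_equal_controls_the_set := by
  intro S start end_ _set _
  unfold Spec_controls_the_set controls_the_set controls_the_set_alt
  set cs := PySem.List.slice S.toList (some start) (some (end_ + 1)) with hcs
  rw [ctsLoop_eq_foldl, foldl_ctsStep_isEmpty, all_ofList_counts]
  cases cs with
  | nil => simp
  | cons c l => simp
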